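-- pv_equiv track=rewrite | github.com/LennartGr/Differential-Drive-Robot-with-Pygame | arrayUtils.py | getIndicePairsWithValueDistance
-- ===== SOURCE A (Python) =====
-- def getIndicePairsWithValueDistance(myArray, searchedDistance, tolerance):
--     pairsList = []
--     for i in range(len(myArray)):
--         for j in range(i + 1, len(myArray)):
--             distance = abs(myArray[i] - myArray[j])
--             if abs(distance - searchedDistance) <= tolerance:
--                 pairsList.append((i, j))
--     return pairsList
-- ===== SOURCE B (Python) =====
-- def getIndicePairsWithValueDistance(myArray, searchedDistance, tolerance):
--     # Suffix-walk decomposition: peel one head element at a time and pair it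
--     # with the remaining suffix via enumerate, instead of A's double index loop.
--     pairsList = []
--     i = 0
--     rest = list(myArray)
--     while rest:
--         head = rest[0]
--         rest = rest[1:]
--         pairsList.extend(
--             (i, j)
--             for j, v in enumerate(rest, i + 1)
--             if abs(abs(head - v) - searchedDistance) <= tolerance
--         )
--         i += 1
--     return pairsList
-- ===== Notes on version B (the rewrite author's own statement) =====
-- stated objective: alternative
-- what changed: Replaces A's nested index loops (range(i), range(i+1,n) with repeated myArray[i]/myArray[j] indexing) by a structural suffix walk: peel the head element off a shrinking suffix and pair it with the rest via enumerate, extending the result per head.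
import Mathlib
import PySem

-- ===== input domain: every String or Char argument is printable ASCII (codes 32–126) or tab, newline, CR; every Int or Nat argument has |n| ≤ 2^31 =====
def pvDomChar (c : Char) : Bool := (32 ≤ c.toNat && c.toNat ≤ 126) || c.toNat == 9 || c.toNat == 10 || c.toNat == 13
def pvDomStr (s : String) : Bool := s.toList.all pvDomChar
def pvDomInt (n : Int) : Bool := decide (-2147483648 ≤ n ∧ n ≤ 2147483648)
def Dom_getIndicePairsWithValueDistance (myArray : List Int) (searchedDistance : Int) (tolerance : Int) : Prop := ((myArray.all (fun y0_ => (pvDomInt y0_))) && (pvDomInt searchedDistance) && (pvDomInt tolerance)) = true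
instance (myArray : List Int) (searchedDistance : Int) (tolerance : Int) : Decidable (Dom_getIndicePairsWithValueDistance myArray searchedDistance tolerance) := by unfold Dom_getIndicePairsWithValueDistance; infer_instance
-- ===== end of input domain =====

-- B replaces A's nested index loops by a structural suffix walk (peel the head, pair it with the
-- remaining suffix via enumerate) — same cost, different decomposition ("alternative").

-- ===== PORT A =====
def getIndicePairsWithValueDistance (myArray : List Int) (searchedDistance : Int) (tolerance : Int) : List (Int × Int) :=
  (PySem.List.pyRange 0 (myArray.length : Int)).foldl
    (fun pairsList i =>
      (PySem.List.pyRange (i + 1) (myArray.length : Int)).foldl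
        (fun pairsList j =>
          let distance := |PySem.List.pyGetD myArray i 0 - PySem.List.pyGetD myArray j 0|
          if |distance - searchedDistance| ≤ tolerance then pairsList ++ [(i, j)] else pairsList)
        pairsList)
    []

-- ===== PORT B =====
def pvSuffixWalk (searchedDistance tolerance : Int) (i : Int) : List Int → List (Int × Int)
  | [] => []
  | head :: rest =>
      ((PySem.List.enumerate rest (i + 1)).filter
          (fun p => decide (|(|head - p.2|) - searchedDistance| ≤ tolerance))).map
        (fun p => (i, p.1))
      ++ pvSuffixWalk searchedDistance tolerance (i + 1) rest

def getIndicePairsWithValueDistance_alt (myArray : List Int) (searchedDistance : Int) (tolerance : Int) : List (Int × Int) :=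
  pvSuffixWalk searchedDistance tolerance 0 myArray

-- ===== PRECONDITION & SPEC =====
def Spec_getIndicePairsWithValueDistance (myArray : List Int) (searchedDistance : Int) (tolerance : Int) (out : List (Int × Int)) : Prop := out = getIndicePairsWithValueDistance_alt myArray searchedDistance tolerance
instance (myArray : List Int) (searchedDistance : Int) (tolerance : Int) (out : List (Int × Int)) : Decidable (Spec_getIndicePairsWithValueDistance myArray searchedDistance tolerance out) := by unfold Spec_getIndicePairsWithValueDistance; infer_instance

-- ===== CLAIM (what is proved, stated in full; the proofs are below) =====
def Claim_equal_getIndicePairsWithValueDistance : Prop := ∀ (myArray : List Int) (searchedDistance : Int) (tolerance : Int), Dom_getIndicePairsWithValueDistance myArray searchedDistance tolerance → Spec_getIndicePairsWithValueDistance myArray searchedDistance tolerance (getIndicePairsWithValueDistance myArray searchedDistance tolerance)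

-- ===== LEMMAS AND PROOFS =====

-- proof-only helper: what A's inner loop (for fixed i) produces
def pvInner (arr : List Int) (d t i : Int) : List (Int × Int) :=
  ((PySem.List.pyRange (i + 1) (arr.length : Int)).filter
      (fun j => decide (|(|PySem.List.pyGetD arr i 0 - PySem.List.pyGetD arr j 0|) - d| ≤ t))).map
    (fun j => (i, j))

lemma pvA_flat (arr : List Int) (d t : Int) :
    getIndicePairsWithValueDistance arr d t
      = (PySem.List.pyRange 0 (arr.length : Int)).flatMap (fun i => pvInner arr d t i) := by
  unfold getIndicePairsWithValueDistance pvInner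
  simp only [PySem.List.foldl_append_ite (p := fun j => _ ≤ _),
    PySem.List.foldl_append_eq_flatMap, List.nil_append]

lemma pvEnum_as_range (xs : List Int) : ∀ (s : Int),
    PySem.List.enumerate xs s
      = (PySem.List.pyRange s (s + xs.length)).map
          (fun j => (j, PySem.List.pyGetD xs (j - s) 0)) := by
  induction xs with
  | nil =>
      intro s
      simp [PySem.List.enumerate, PySem.List.pyRange_one_eq_nil (le_refl s)]
  | cons x xs ih =>
      intro s
      rw [PySem.List.enumerate_cons,
        PySem.List.pyRange_one_cons (by simp only [List.length_cons]; push_cast; omega),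
        List.map_cons]
      refine List.cons_eq_cons.mpr ⟨?_, ?_⟩
      · have h0 : s - s = (0 : Int) := by omega
        rw [h0, PySem.List.pyGetD_of_nonneg _ _ (le_refl (0 : Int))]
        rfl
      · rw [ih (s + 1)]
        have hlen : s + ((x :: xs).length : Int) = (s + 1) + xs.length := by
          simp only [List.length_cons]; push_cast; ring
        rw [hlen]
        refine List.map_congr_left (fun j hj => ?_)
        rcases PySem.List.mem_pyRange_one.mp hj with ⟨hj1, hj2⟩
        simp only [Prod.mk.injEq, true_and]
        rw [PySem.List.pyGetD_of_nonneg _ _ (by omega), PySem.List.pyGetD_of_nonneg _ _ (by omega)]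
        have ht : (j - s).toNat = (j - (s + 1)).toNat + 1 := by omega
        rw [ht, List.getD_cons_succ]

lemma pvGetD_at (pre rest : List Int) (x : Int) :
    PySem.List.pyGetD (pre ++ x :: rest) (pre.length : Int) 0 = x := by
  rw [PySem.List.pyGetD_natCast]
  simp [List.getD]

lemma pvGetD_shift (pre rest : List Int) (x : Int) {j : Int}
    (h1 : (pre.length : Int) + 1 ≤ j) (_h2 : j < (pre.length : Int) + 1 + rest.length) :
    PySem.List.pyGetD (pre ++ x :: rest) j 0
      = PySem.List.pyGetD rest (j - ((pre.length : Int) + 1)) 0 := by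
  rw [PySem.List.pyGetD_of_nonneg _ _ (by omega), PySem.List.pyGetD_of_nonneg _ _ (by omega)]
  have hlen : pre.length ≤ j.toNat := by omega
  simp only [List.getD, List.getElem?_append_right hlen]
  have : j.toNat - pre.length = (j - ((pre.length : Int) + 1)).toNat + 1 := by omega
  rw [this]
  rfl

lemma pvHead_eq (pre rest : List Int) (x d t : Int) :
    ((PySem.List.enumerate rest ((pre.length : Int) + 1)).filter
        (fun p => decide (|(|x - p.2|) - d| ≤ t))).map
      (fun p => ((pre.length : Int), p.1))
      = pvInner (pre ++ x :: rest) d t (pre.length : Int) := by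
  unfold pvInner
  have hL : (((pre ++ x :: rest).length : Nat) : Int) = ((pre.length : Int) + 1) + rest.length := by
    simp only [List.length_append, List.length_cons]; push_cast; ring
  rw [pvEnum_as_range rest ((pre.length : Int) + 1), hL, List.filter_map, List.map_map]
  have hp : ∀ j ∈ PySem.List.pyRange ((pre.length : Int) + 1) (((pre.length : Int) + 1) + rest.length),
      decide (|(|x - PySem.List.pyGetD rest (j - ((pre.length : Int) + 1)) 0|) - d| ≤ t)
        = decide (|(|PySem.List.pyGetD (pre ++ x :: rest) (pre.length : Int) 0
            - PySem.List.pyGetD (pre ++ x :: rest) j 0|) - d| ≤ t) := by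
    intro j hj
    rcases PySem.List.mem_pyRange_one.mp hj with ⟨hj1, hj2⟩
    rw [pvGetD_at, pvGetD_shift pre rest x hj1 hj2]
  simp only [Function.comp_def]
  rw [List.filter_congr hp]

lemma pvWalk_eq (d t : Int) : ∀ (suf pre : List Int),
    pvSuffixWalk d t (pre.length : Int) suf
      = (PySem.List.pyRange (pre.length : Int) (((pre ++ suf).length : Nat) : Int)).flatMap
          (fun i => pvInner (pre ++ suf) d t i) := by
  intro suf
  induction suf with
  | nil =>
      intro pre
      simp [pvSuffixWalk, PySem.List.pyRange_one_eq_nil (le_refl _)]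
  | cons x rest ih =>
      intro pre
      simp only [pvSuffixWalk]
      rw [PySem.List.pyRange_one_cons (by simp only [List.length_append, List.length_cons]; push_cast; omega),
        List.flatMap_cons, pvHead_eq]
      have h1 : ((pre ++ [x]).length : Int) = (pre.length : Int) + 1 := by
        simp
      have h2 : (pre ++ [x]) ++ rest = pre ++ x :: rest := by
        simp
      have := ih (pre ++ [x])
      rw [h2] at this
      rw [h1] at this
      rw [this]

-- ===== VERDICT (by name: the statement is the Claim_ definition above) =====
theorem getIndicePairsWithValueDistance_spec : Claim_equal_getIndicePairsWithValueDistance := by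
  intro arr d t _
  unfold Spec_getIndicePairsWithValueDistance getIndicePairsWithValueDistance_alt
  rw [pvA_flat]
  simpa using (pvWalk_eq d t arr []).symm
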